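-- pv_equiv track=rewrite | github.com/rawrex/srs.nvim | packs/quote_block.py | split_note_into_cards
-- ===== SOURCE A (Python) =====
-- from typing import TYPE_CHECKING, ClassVar, Dict, List, Tuple
--
-- def split_note_into_cards(note_text: str) -> List[Tuple[int, int, str]]:
--     cards: List[Tuple[int, int, str]] = []
--     current_start: int | None = None
--     current_lines: List[str] = []
--
--     for line_number, line in enumerate(
--         note_text.splitlines(keepends=True), start=1
--     ):
--         if line.startswith(">"):
--             if current_start is None:
--                 current_start = line_number
--             current_lines.append(line)
--             continue
--
--         if current_start is not None:
--             cards.append((current_start, line_number - 1, "".join(current_lines)))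
--             current_start = None
--             current_lines = []
--
--     if current_start is not None:
--         cards.append(
--             (
--                 current_start,
--                 current_start + len(current_lines) - 1,
--                 "".join(current_lines),
--             )
--         )
--
--     return cards
-- ===== SOURCE B (Python) =====
-- from typing import List, Tuple
--
--
-- def split_note_into_cards(note_text: str) -> List[Tuple[int, int, str]]:
--     lines = note_text.splitlines(keepends=True)
--     quote = [line.startswith(">") for line in lines]
--     prev = [False] + quote[:-1]
--     nxt = quote[1:] + [False]
--     starts = [i for i in range(len(lines)) if quote[i] and not prev[i]]
--     ends = [i for i in range(len(lines)) if quote[i] and not nxt[i]]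
--     return [
--         (s + 1, e + 1, "".join(lines[s : e + 1]))
--         for s, e in zip(starts, ends)
--     ]
-- ===== Notes on version B (the rewrite author's own statement) =====
-- stated objective: alternative
-- what changed: Replaces A's one-pass state machine (current_start/current_lines accumulator with an end-of-loop flush) by staged passes over precomputed boolean masks: shift the quote mask to detect run boundaries, collect all start indices and all end indices separately, zip them, and build each card by slicing the line list.
import Mathlib
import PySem

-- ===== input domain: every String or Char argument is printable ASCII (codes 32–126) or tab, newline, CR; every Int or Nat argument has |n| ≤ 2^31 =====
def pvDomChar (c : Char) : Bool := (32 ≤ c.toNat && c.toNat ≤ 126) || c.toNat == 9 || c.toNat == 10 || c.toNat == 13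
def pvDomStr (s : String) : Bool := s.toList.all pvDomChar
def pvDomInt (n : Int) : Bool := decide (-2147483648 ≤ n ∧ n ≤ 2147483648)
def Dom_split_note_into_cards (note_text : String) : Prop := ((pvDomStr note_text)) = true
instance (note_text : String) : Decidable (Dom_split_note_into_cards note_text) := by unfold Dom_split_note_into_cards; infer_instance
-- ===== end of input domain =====

-- B replaces A's stateful accumulator scan by boundary detection on shifted quote masks plus slicing (alternative decomposition, same cost).

-- ===== PORT A =====
-- hand-written splitlines(keepends=True), shared by both ports (both Pythons call it);
-- exact on the ASCII domain, whose only line breaks are '\n', '\r', '\r\n'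
def pvLinesKeep : List Char → List (List Char)
  | [] => []
  | c :: rest =>
    if c = '\r' then
      match rest with
      | '\n' :: rest' => ['\r', '\n'] :: pvLinesKeep rest'
      | r => ['\r'] :: pvLinesKeep r
    else if c = '\n' then ['\n'] :: pvLinesKeep rest
    else
      match pvLinesKeep rest with
      | [] => [[c]]
      | l :: ls => (c :: l) :: ls
termination_by l => l.length
decreasing_by all_goals simp_all

def pvLines (s : String) : List String := (pvLinesKeep s.toList).map String.mk

def pvQ (l : String) : Bool := PySem.Str.startswith l ">"

def pvJoin (ls : List String) : String := PySem.Str.join "" ls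

-- the body of A's for-loop (state: cards, current_start, current_lines)
def pvStep (st : List (Int × Int × String) × Option Int × List String) (p : Int × String) :
    List (Int × Int × String) × Option Int × List String :=
  if pvQ p.2 then
    (st.1, some (st.2.1.getD p.1), st.2.2 ++ [p.2])
  else
    match st.2.1 with
    | some s => (st.1 ++ [(s, p.1 - 1, pvJoin st.2.2)], none, ([] : List String))
    | none => st

-- A's trailing 'if current_start is not None' flush
def pvFlush (st : List (Int × Int × String) × Option Int × List String) : List (Int × Int × String) :=
  match st.2.1 with
  | some s => st.1 ++ [(s, s + (st.2.2.length : Int) - 1, pvJoin st.2.2)]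
  | none => st.1

def split_note_into_cards (note_text : String) : List (Int × Int × String) :=
  pvFlush ((PySem.List.enumerate (pvLines note_text) 1).foldl pvStep ([], none, []))

-- ===== PORT B =====
-- Source B: quote mask, its two shifts (prev = [False]+quote[:-1], nxt = quote[1:]+[False]),
-- start/end indices by comprehension over range(len(lines)), then zip + slice-join
def split_note_into_cards_alt (note_text : String) : List (Int × Int × String) :=
  let lines := pvLines note_text
  let quote := lines.map pvQ
  let prev := false :: quote.dropLast
  let nxt := quote.tail ++ [false]
  let starts := (List.range lines.length).filter
    (fun i => quote.getD i false && !(prev.getD i false))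
  let ends := (List.range lines.length).filter
    (fun i => quote.getD i false && !(nxt.getD i false))
  (starts.zip ends).map (fun p =>
    ((p.1 : Int) + 1, (p.2 : Int) + 1, pvJoin ((lines.drop p.1).take (p.2 + 1 - p.1))))

-- ===== PRECONDITION & SPEC =====
def Spec_split_note_into_cards (note_text : String) (out : List (Int × Int × String)) : Prop := out = split_note_into_cards_alt note_text
instance (note_text : String) (out : List (Int × Int × String)) : Decidable (Spec_split_note_into_cards note_text out) := by unfold Spec_split_note_into_cards; infer_instance

-- ===== CLAIM (what is proved, stated in full; the proofs are below) =====
def Claim_equal_split_note_into_cards : Prop := ∀ (note_text : String), Dom_split_note_into_cards note_text → Spec_split_note_into_cards note_text (split_note_into_cards note_text)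

-- ===== LEMMAS AND PROOFS =====

-- common recursive characterisation: one card per maximal quote block
def pvBgo : Int → List String → List (Int × Int × String)
  | _, [] => []
  | n, l :: ls =>
    if pvQ l then
      (n, n + 1 + ((ls.takeWhile pvQ).length : Int) - 1, pvJoin (l :: ls.takeWhile pvQ)) ::
        pvBgo (n + 1 + (ls.takeWhile pvQ).length) (ls.dropWhile pvQ)
    else pvBgo (n + 1) ls
termination_by _ l => l.length
decreasing_by
  · simp
    exact List.Sublist.length_le (List.dropWhile_sublist _)
  · simp

-- the remaining output of A from a given loop state
def pvRest (n : Int) (ls : List String) (ost : Option Int) (cl : List String) :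
    List (Int × Int × String) :=
  match ost with
  | none => pvBgo n ls
  | some s =>
    (s, s + (cl.length : Int) + ((ls.takeWhile pvQ).length : Int) - 1,
      pvJoin (cl ++ ls.takeWhile pvQ)) ::
      pvBgo (n + ((ls.takeWhile pvQ).length : Int)) (ls.dropWhile pvQ)

-- A's loop with flush computes pvRest (invariant: current line number vs start and buffer length)
theorem A_main :
    ∀ (ls : List String) (n : Int) (cards : List (Int × Int × String))
      (ost : Option Int) (cl : List String),
      (ost = none → cl = []) → (∀ s, ost = some s → n = s + (cl.length : Int)) →
      pvFlush ((PySem.List.enumerate ls n).foldl pvStep (cards, ost, cl)) =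
        cards ++ pvRest n ls ost cl := by
  intro ls
  induction ls with
  | nil =>
    intro n cards ost cl h0 h1
    cases ost with
    | none =>
      rw [h0 rfl]
      simp [PySem.List.enumerate, pvFlush, pvRest, pvBgo]
    | some s =>
      simp only [PySem.List.enumerate, List.foldl_nil, pvFlush, pvRest, List.takeWhile_nil,
        List.dropWhile_nil, List.length_nil, List.append_nil, pvBgo]
      norm_num
  | cons l tl ih =>
    intro n cards ost cl h0 h1
    rw [PySem.List.enumerate_cons, List.foldl_cons]
    by_cases h : pvQ l
    · -- quote line: start or extend the block
      have hstep : pvStep (cards, ost, cl) (n, l) = (cards, some (ost.getD n), cl ++ [l]) := by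
        simp [pvStep, h]
      rw [hstep]
      rw [ih (n + 1) cards (some (ost.getD n)) (cl ++ [l]) (by simp)
        (by
          intro s hs
          cases ost with
          | none =>
            simp at hs
            subst hs
            rw [h0 rfl]
            simp
          | some s' =>
            simp at hs
            subst hs
            rw [h1 s' rfl]
            push_cast [List.length_append, List.length_cons, List.length_nil]
            ring)]
      cases ost with
      | none =>
        have hcl : cl = [] := h0 rfl
        subst hcl
        simp only [Option.getD_none, pvRest]
        conv_rhs => rw [pvBgo]
        simp only [h, if_true, List.nil_append]
        refine congrArg (fun z => cards ++ z) ?_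
        simp only [List.cons.injEq, Prod.mk.injEq, List.singleton_append]
        and_intros <;> first | rfl | trivial | (push_cast [List.length_append, List.length_cons, List.length_nil]; ring) | (congr 1; push_cast [List.length_append, List.length_cons, List.length_nil]; ring)
      | some s =>
        simp only [Option.getD_some, pvRest]
        rw [List.takeWhile_cons_of_pos h, List.dropWhile_cons_of_pos h]
        refine congrArg (fun z => cards ++ z) ?_
        simp only [List.cons.injEq, Prod.mk.injEq, List.append_assoc, List.singleton_append]
        and_intros <;> first | rfl | trivial | (push_cast [List.length_append, List.length_cons, List.length_nil]; ring) | (congr 1; push_cast [List.length_append, List.length_cons, List.length_nil]; ring)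
    · -- non-quote line: flush the pending block (if any)
      cases ost with
      | none =>
        have hcl : cl = [] := h0 rfl
        subst hcl
        have hstep : pvStep (cards, none, ([] : List String)) (n, l) = (cards, none, []) := by
          simp [pvStep, h]
        rw [hstep]
        rw [ih (n + 1) cards none [] (fun _ => rfl) (by intro s hs; simp at hs)]
        simp only [pvRest]
        conv_rhs => rw [pvBgo]
        simp [h]
      | some s =>
        have hstep : pvStep (cards, some s, cl) (n, l) =
            (cards ++ [(s, n - 1, pvJoin cl)], none, ([] : List String)) := by
          simp [pvStep, h]
        rw [hstep]
        rw [ih (n + 1) _ none [] (fun _ => rfl) (by intro s hs; simp at hs)]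
        simp only [pvRest]
        rw [List.takeWhile_cons_of_neg h, List.dropWhile_cons_of_neg h]
        rw [List.append_assoc]
        refine congrArg (fun z => cards ++ z) ?_
        rw [List.singleton_append]
        simp only [List.cons.injEq, Prod.mk.injEq]
        refine ⟨⟨trivial, ?_, ?_⟩, ?_⟩
        · rw [h1 s rfl]
          push_cast [List.length_nil]
          ring
        · simp
        · conv_rhs => rw [pvBgo]
          simp [h]

-- ===== B-side characterisation: boundary masks as structural recursions =====

-- start indices of q given the previous flag p
def sRec : Bool → List Bool → List Nat
  | _, [] => []
  | p, b :: bs => (if b && !p then [0] else []) ++ (sRec b bs).map (· + 1)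

-- end indices of q
def eRec : List Bool → List Nat
  | [] => []
  | b :: bs => (if b && !(bs.getD 0 false) then [0] else []) ++ (eRec bs).map (· + 1)

-- the range-filter for start indices equals sRec
theorem filt_s : ∀ (q : List Bool) (p : Bool),
    (List.range q.length).filter (fun i => q.getD i false && !((p :: q).getD i false)) = sRec p q := by
  intro q
  induction q with
  | nil => intro p; simp [sRec]
  | cons b bs ih =>
    intro p
    rw [List.length_cons, List.range_succ_eq_map, List.filter_cons, List.filter_map, sRec]
    have hpred : ((fun i => (b :: bs).getD i false && !((p :: b :: bs).getD i false)) ∘ Nat.succ)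
        = (fun i => bs.getD i false && !((b :: bs).getD i false)) := by
      funext i; simp [List.getD_cons_succ]
    rw [hpred, ih b]
    split <;> simp_all [Nat.succ_eq_add_one]

-- the range-filter for end indices equals eRec
theorem filt_e : ∀ (q : List Bool),
    (List.range q.length).filter (fun i => q.getD i false && !(q.getD (i + 1) false)) = eRec q := by
  intro q
  induction q with
  | nil => simp [eRec]
  | cons b bs ih =>
    rw [List.length_cons, List.range_succ_eq_map, List.filter_cons, List.filter_map, eRec]
    have hpred : ((fun i => (b :: bs).getD i false && !((b :: bs).getD (i + 1) false)) ∘ Nat.succ)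
        = (fun i => bs.getD i false && !(bs.getD (i + 1) false)) := by
      funext i; simp [List.getD_cons_succ]
    rw [hpred, ih]
    split <;> simp_all [Nat.succ_eq_add_one]

-- the port's prev list agrees with false :: q on in-range indices
theorem pvPrevD : ∀ (q : List Bool) (i : Nat), i < q.length →
    (false :: q.dropLast).getD i false = (false :: q).getD i false := by
  intro q i hi
  cases i with
  | zero => rfl
  | succ i =>
    rw [List.getD_cons_succ, List.getD_cons_succ]
    have h1 : i < q.dropLast.length := by
      rw [List.length_dropLast]; omega
    rw [List.getD_eq_getElem _ _ h1, List.getD_eq_getElem _ _ (by omega)]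
    exact List.getElem_dropLast ..

-- the port's next list agrees with q shifted
theorem pvAppF : ∀ (bs : List Bool) (i : Nat), (bs ++ [false]).getD i false = bs.getD i false := by
  intro bs
  induction bs with
  | nil => intro i; cases i <;> rfl
  | cons b bs ih =>
    intro i
    cases i with
    | zero => rfl
    | succ i => rw [List.cons_append, List.getD_cons_succ, List.getD_cons_succ, ih]

theorem pvNxtD : ∀ (q : List Bool) (i : Nat),
    (q.tail ++ [false]).getD i false = q.getD (i + 1) false := by
  intro q i
  cases q with
  | nil => rw [List.tail_nil, pvAppF]; rfl
  | cons b bs => rw [List.tail_cons, pvAppF, List.getD_cons_succ]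

-- take/drop by the takeWhile length
theorem takeW_take : ∀ (tl : List String), tl.take (tl.takeWhile pvQ).length = tl.takeWhile pvQ := by
  intro tl
  induction tl with
  | nil => rfl
  | cons t tt ih =>
    by_cases h : pvQ t
    · rw [List.takeWhile_cons_of_pos h, List.length_cons, List.take_succ_cons, ih]
    · rw [List.takeWhile_cons_of_neg h]; rfl

theorem dropW_drop : ∀ (tl : List String), tl.drop (tl.takeWhile pvQ).length = tl.dropWhile pvQ := by
  intro tl
  induction tl with
  | nil => rfl
  | cons t tt ih =>
    by_cases h : pvQ t
    · rw [List.takeWhile_cons_of_pos h, List.dropWhile_cons_of_pos h, List.length_cons,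
        List.drop_succ_cons, ih]
    · rw [List.takeWhile_cons_of_neg h, List.dropWhile_cons_of_neg h]; rfl

-- inside a quote run, sRec true produces no starts until the run ends
theorem run_s : ∀ (tl : List String),
    sRec true (tl.map pvQ) =
      (sRec false ((tl.dropWhile pvQ).map pvQ)).map (· + (tl.takeWhile pvQ).length) := by
  intro tl
  induction tl with
  | nil => simp [sRec]
  | cons t tt ih =>
    by_cases h : pvQ t
    · rw [List.takeWhile_cons_of_pos h, List.dropWhile_cons_of_pos h]
      rw [List.map_cons, h, sRec]
      simp only [Bool.not_true, Bool.and_false, List.nil_append, ih, List.map_map]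
      refine List.map_congr_left (fun a _ => ?_)
      simp only [Function.comp_apply, List.length_cons]
      omega
    · rw [List.takeWhile_cons_of_neg h, List.dropWhile_cons_of_neg h,
        List.map_cons, (Bool.not_eq_true _).mp h]
      simp only [sRec, Bool.false_and, Bool.false_eq_true, if_false, List.nil_append,
        List.length_nil, List.map_map]
      refine (List.map_congr_left (fun a _ => ?_)).symm
      simp

-- a quote run ends exactly at its last line
theorem run_e : ∀ (tl : List String),
    eRec (true :: tl.map pvQ) =
      (tl.takeWhile pvQ).length ::
        (eRec ((tl.dropWhile pvQ).map pvQ)).map (· + ((tl.takeWhile pvQ).length + 1)) := by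
  intro tl
  induction tl with
  | nil => simp [eRec]
  | cons t tt ih =>
    by_cases h : pvQ t
    · rw [List.takeWhile_cons_of_pos h, List.dropWhile_cons_of_pos h]
      rw [List.map_cons, h, eRec]
      simp only [List.getD_cons_zero, Bool.not_true, Bool.and_false, List.nil_append, ih,
        List.map_cons, List.map_map, List.length_cons]
      congr 1
    · rw [List.takeWhile_cons_of_neg h, List.dropWhile_cons_of_neg h,
        List.map_cons, (Bool.not_eq_true _).mp h]
      simp only [eRec, List.getD_cons_zero, Bool.not_false, Bool.and_true, Bool.false_and,
        Bool.false_eq_true, if_false, if_true, List.nil_append, List.map_map, List.length_nil,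
        List.map_cons, List.singleton_append]

-- B's zipped boundaries compute pvBgo
theorem B_main : ∀ (m : Nat) (ls : List String), ls.length ≤ m → ∀ (base : Int),
    ((sRec false (ls.map pvQ)).zip (eRec (ls.map pvQ))).map
      (fun p => ((p.1 : Int) + base, (p.2 : Int) + base,
        pvJoin ((ls.drop p.1).take (p.2 + 1 - p.1))))
      = pvBgo base ls := by
  intro m
  induction m with
  | zero =>
    intro ls _ base
    have : ls = [] := List.length_eq_zero_iff.mp (by omega)
    subst this
    simp [sRec, eRec, pvBgo]
  | succ m ih =>
    intro ls hlen base
    cases ls with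
    | nil => simp [sRec, eRec, pvBgo]
    | cons l tl =>
      by_cases h : pvQ l
      · rw [List.map_cons, h, sRec, run_s tl, run_e tl]
        simp only [Bool.not_false, Bool.and_true, Bool.true_and, if_true, List.map_map,
          List.singleton_append, List.zip_cons_cons, List.map_cons]
        rw [pvBgo]
        simp only [h, if_true]
        congr 1
        · -- the head card
          simp only [List.drop_zero]
          have htake : (l :: tl).take ((tl.takeWhile pvQ).length + 1 - 0) = l :: tl.takeWhile pvQ := by
            simp only [Nat.sub_zero, List.take_succ_cons, takeW_take]
          rw [htake]
          refine Prod.ext (by push_cast; ring) (Prod.ext (by push_cast; ring) rfl)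
        · -- the tail cards
          have hcomp : (sRec false ((tl.dropWhile pvQ).map pvQ)).map
              ((· + 1) ∘ (· + (tl.takeWhile pvQ).length)) =
              (sRec false ((tl.dropWhile pvQ).map pvQ)).map (· + ((tl.takeWhile pvQ).length + 1)) := by
            refine List.map_congr_left (fun a _ => ?_)
            simp only [Function.comp_apply]; omega
          rw [hcomp, List.zip_map, List.map_map]
          have := ih (tl.dropWhile pvQ)
            (by
              have := List.Sublist.length_le (List.dropWhile_sublist (l := tl) pvQ)
              simp only [List.length_cons] at hlen; omega)
            (base + 1 + ((tl.takeWhile pvQ).length : Int))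
          rw [← this]
          refine List.map_congr_left (fun p _ => ?_)
          obtain ⟨ps, pe⟩ := p
          simp only [Prod.map, Function.comp_apply]
          have hdrop : (l :: tl).drop (ps + ((tl.takeWhile pvQ).length + 1)) =
              (tl.dropWhile pvQ).drop ps := by
            have : ps + ((tl.takeWhile pvQ).length + 1) = (ps + (tl.takeWhile pvQ).length) + 1 := by omega
            rw [this, List.drop_succ_cons, ← dropW_drop tl, List.drop_drop]
            congr 1
            omega
          rw [hdrop]
          have harith : pe + ((tl.takeWhile pvQ).length + 1) + 1 - (ps + ((tl.takeWhile pvQ).length + 1))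
              = pe + 1 - ps := by omega
          rw [harith]
          refine Prod.ext (by push_cast; ring) (Prod.ext (by push_cast; ring) rfl)
      · rw [List.map_cons, (Bool.not_eq_true _).mp h, sRec, eRec]
        simp only [Bool.false_and, Bool.false_eq_true, if_false, List.nil_append,
          List.getD_cons_zero]
        rw [List.zip_map, List.map_map]
        rw [pvBgo]
        simp only [h, if_false]
        have := ih tl (by simp only [List.length_cons] at hlen; omega) (base + 1)
        rw [← this]
        refine List.map_congr_left (fun p _ => ?_)
        obtain ⟨ps, pe⟩ := p
        simp only [Prod.map, Function.comp_apply]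
        rw [List.drop_succ_cons]
        have harith : pe + 1 + 1 - (ps + 1) = pe + 1 - ps := by omega
        rw [harith]
        refine Prod.ext (by push_cast; ring) (Prod.ext (by push_cast; ring) rfl)

-- ===== VERDICT (by name: the statement is the Claim_ definition above) =====
theorem split_note_into_cards_spec : Claim_equal_split_note_into_cards := by
  intro note_text _
  show split_note_into_cards note_text = split_note_into_cards_alt note_text
  unfold split_note_into_cards split_note_into_cards_alt
  rw [A_main (pvLines note_text) 1 [] none [] (fun _ => rfl) (by intro s hs; simp at hs)]
  simp only [pvRest, List.nil_append]
  set lines := pvLines note_text with hlines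
  have hlen : lines.length = (lines.map pvQ).length := (List.length_map ..).symm
  have hstart : (List.range lines.length).filter
      (fun i => (lines.map pvQ).getD i false && !((false :: (lines.map pvQ).dropLast).getD i false))
      = sRec false (lines.map pvQ) := by
    rw [← filt_s (lines.map pvQ) false, hlen]
    refine List.filter_congr (fun i hi => ?_)
    rw [pvPrevD _ i (by simpa using List.mem_range.mp hi)]
  have hend : (List.range lines.length).filter
      (fun i => (lines.map pvQ).getD i false && !(((lines.map pvQ).tail ++ [false]).getD i false))
      = eRec (lines.map pvQ) := by
    rw [← filt_e (lines.map pvQ), hlen]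
    refine List.filter_congr (fun i hi => ?_)
    rw [pvNxtD]
  rw [hstart, hend]
  exact (B_main lines.length lines le_rfl 1).symm
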